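-- pv_equiv track=rewrite | github.com/carlosp/advent-of-code | 2023/11-cosmic-expansion/solve_2.py | parseImage
-- ===== SOURCE A (Python) =====
-- def parseImage(image):
-- 	height, width = len(image), len(image[0])
-- 	emptyRows, emptyCols = set(range(height)), set(range(width))
-- 	galaxies = []
--
-- 	for row in range(height):
-- 		for col in range(width):
-- 			if image[row][col] == '#':
-- 				emptyRows.discard(row)
-- 				emptyCols.discard(col)
-- 				galaxies += [(row, col)]
--
-- 	return sorted(emptyRows), sorted(emptyCols), galaxies
-- ===== SOURCE B (Python) =====
-- def parseImage(image):
-- 	height, width = len(image), len(image[0])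
-- 	galaxies = [(r, c) for r in range(height) for c in range(width) if image[r][c] == '#']
-- 	emptyRows = [r for r in range(height) if all(image[r][c] != '#' for c in range(width))]
-- 	emptyCols = [c for c in range(width) if all(image[r][c] != '#' for r in range(height))]
-- 	return emptyRows, emptyCols, galaxies
-- ===== Notes on version B (the rewrite author's own statement) =====
-- stated objective: simpler
-- what changed: Replaces A's single accumulate-and-discard pass over two shrinking sets (plus final sorts) with three independent comprehensions: a row-major galaxy scan, a per-row emptiness scan, and a column-major per-column scan, each emitting an already-ascending list so no sets or sorting are needed.
import Mathlib
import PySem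

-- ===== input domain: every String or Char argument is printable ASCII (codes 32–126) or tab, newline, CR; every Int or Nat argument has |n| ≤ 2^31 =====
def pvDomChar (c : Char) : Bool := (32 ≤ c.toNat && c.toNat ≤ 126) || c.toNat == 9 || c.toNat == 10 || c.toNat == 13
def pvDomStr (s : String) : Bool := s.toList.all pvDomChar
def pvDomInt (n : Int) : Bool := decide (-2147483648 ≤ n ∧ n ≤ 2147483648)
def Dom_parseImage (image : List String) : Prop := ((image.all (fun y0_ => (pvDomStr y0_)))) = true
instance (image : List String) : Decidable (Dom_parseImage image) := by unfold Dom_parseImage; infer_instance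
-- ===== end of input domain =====

-- B replaces A's single accumulate-and-discard pass over two shrinking sets (plus final sorts)
-- with three independent comprehension-shaped passes (row-major galaxies, per-row emptiness,
-- column-major per-column emptiness) whose outputs are ascending by construction: simpler, no sets, no sorting.

-- shared cell read: 'image[row][col] == "#"'; exact under Pre_parseImage (indices in range; out of
-- range Python raises where pyGetD/pyGet? give a non-'#' default, but Pre_ excludes those inputs)
def pvCell (image : List String) (r c : Int) : Bool :=
  PySem.Str.pyGet? (PySem.List.pyGetD image r "") c == some '#'

-- ===== PORT A =====
def parseImage (image : List String) : List Int × List Int × (List (Int × Int)) :=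
  let height : Int := image.length
  let width : Int := PySem.Str.len (PySem.List.pyGetD image 0 "")
  let emptyRows0 : PySem.Set Int := PySem.Set.ofList (PySem.List.pyRange 0 height 1)
  let emptyCols0 : PySem.Set Int := PySem.Set.ofList (PySem.List.pyRange 0 width 1)
  let st :=
    (PySem.List.pyRange 0 height 1).foldl (fun st row =>
      (PySem.List.pyRange 0 width 1).foldl (fun st col =>
        if pvCell image row col then
          (PySem.Set.discard st.1 row, PySem.Set.discard st.2.1 col, st.2.2 ++ [(row, col)])
        else st) st)
      (emptyRows0, emptyCols0, ([] : List (Int × Int)))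
  (PySem.List.sorted st.1 (fun x => x), PySem.List.sorted st.2.1 (fun x => x), st.2.2)

-- ===== PORT B =====
def parseImage_alt (image : List String) : List Int × List Int × (List (Int × Int)) :=
  let height : Int := image.length
  let width : Int := PySem.Str.len (PySem.List.pyGetD image 0 "")
  let rows := PySem.List.pyRange 0 height 1
  let cols := PySem.List.pyRange 0 width 1
  let galaxies := rows.flatMap (fun r => (cols.filter (fun c => pvCell image r c)).map (fun c => (r, c)))
  let emptyRows := rows.filter (fun r => cols.all (fun c => !pvCell image r c))
  let emptyCols := cols.filter (fun c => rows.all (fun r => !pvCell image r c))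
  (emptyRows, emptyCols, galaxies)

-- ===== PRECONDITION & SPEC =====
-- Pre_ excludes exactly the inputs where Python A raises IndexError: the empty image (image[0])
-- and images where some row is shorter than the first row (image[row][col], col < len(image[0])).
def Pre_parseImage (image : List String) : Prop :=
  image ≠ [] ∧ ∀ s ∈ image, PySem.Str.len (PySem.List.pyGetD image 0 "") ≤ PySem.Str.len s
instance (image : List String) : Decidable (Pre_parseImage image) := by unfold Pre_parseImage; infer_instance

def pvWitness_parseImage : List String := [".#.", "...", "#.#"]

def Spec_parseImage (image : List String) (out : List Int × List Int × (List (Int × Int))) : Prop := out = parseImage_alt image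
instance (image : List String) (out : List Int × List Int × (List (Int × Int))) : Decidable (Spec_parseImage image out) := by unfold Spec_parseImage; infer_instance

-- ===== CLAIM (what is proved, stated in full; the proofs are below) =====
def Claim_equal_parseImage : Prop := ∀ (image : List String), Dom_parseImage image → Pre_parseImage image → Spec_parseImage image (parseImage image)

-- ===== LEMMAS AND PROOFS =====

-- a chain of conditional Set.discard's is one filter
theorem pv_discardFold (q : Int → Bool) (L e : List Int) :
    L.foldl (fun e c => if q c then PySem.Set.discard e c else e) e
      = e.filter (fun y => !(L.any (fun c => y == c && q c))) := by
  induction L generalizing e with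
  | nil => simp
  | cons c L ih =>
    simp only [List.foldl_cons]
    by_cases hq : q c = true
    · rw [if_pos hq, ih, PySem.Set.discard, List.filter_filter]
      apply List.filter_congr
      intro y _
      by_cases hy : y = c <;> simp [hy, hq, Bool.and_comm]
    · rw [if_neg hq, ih]
      apply List.filter_congr
      intro y _
      simp [Bool.eq_false_iff.mpr hq]

-- one row of A's double loop, componentwise
theorem pv_innerFold (P : Int → Int → Bool) (r : Int) (cols : List Int)
    (eR eC : List Int) (g : List (Int × Int)) :
    cols.foldl (fun st col =>
        if P r col then
          (PySem.Set.discard st.1 r, PySem.Set.discard st.2.1 col, st.2.2 ++ [(r, col)])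
        else st) (eR, eC, g)
      = (if cols.any (P r) then PySem.Set.discard eR r else eR,
         cols.foldl (fun e c => if P r c then PySem.Set.discard e c else e) eC,
         g ++ (cols.filter (P r)).map (fun c => (r, c))) := by
  induction cols generalizing eR eC g with
  | nil => simp
  | cons c cols ih =>
    simp only [List.foldl_cons]
    by_cases hc : P r c = true
    · rw [if_pos hc, ih]
      refine Prod.ext ?_ (Prod.ext ?_ ?_)
      · simp only [List.any_cons, hc, Bool.true_or, if_true]
        by_cases h2 : cols.any (P r) = true
        · simp [h2, PySem.Set.discard, List.filter_filter]
        · simp [h2]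
      · simp [hc]
      · simp [List.filter_cons_of_pos hc]
    · rw [if_neg hc, ih]
      refine Prod.ext ?_ (Prod.ext ?_ ?_)
      · simp [List.any_cons, Bool.eq_false_iff.mpr hc]
      · simp [hc]
      · rw [List.filter_cons_of_neg hc]

-- A's whole double loop, componentwise
theorem pv_outerFold (P : Int → Int → Bool) (rows cols : List Int)
    (eR eC : List Int) (g : List (Int × Int)) :
    rows.foldl (fun st row =>
        cols.foldl (fun st col =>
          if P row col then
            (PySem.Set.discard st.1 row, PySem.Set.discard st.2.1 col, st.2.2 ++ [(row, col)])
          else st) st) (eR, eC, g)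
      = (rows.foldl (fun e r => if cols.any (P r) then PySem.Set.discard e r else e) eR,
         rows.foldl (fun e r => cols.foldl (fun e c => if P r c then PySem.Set.discard e c else e) e) eC,
         g ++ rows.flatMap (fun r => (cols.filter (P r)).map (fun c => (r, c)))) := by
  induction rows generalizing eR eC g with
  | nil => simp
  | cons r rows ih =>
    simp only [List.foldl_cons]
    rw [pv_innerFold, ih]
    simp [List.flatMap_cons, List.append_assoc]

-- a chain of filters is one filter with the conjunction of the predicates
theorem pv_foldlFilter (rows : List Int) (p : Int → Int → Bool) (e : List Int) :
    rows.foldl (fun e r => e.filter (p r)) e = e.filter (fun y => rows.all (fun r => p r y)) := by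
  induction rows generalizing e with
  | nil => simp
  | cons r rows ih => simp [ih, List.filter_filter, Bool.and_comm]

theorem pv_filter_sorted (h : Int) (p : Int → Bool) :
    PySem.List.sorted ((PySem.List.pyRange 0 h 1).filter p) (fun x => x) = (PySem.List.pyRange 0 h 1).filter p := by
  apply PySem.List.sorted_id_eq_of_perm_of_pairwise _ _ (List.Perm.refl _)
  exact ((PySem.List.pairwise_lt_pyRange_one 0 h).filter p).imp le_of_lt

-- the two filter predicates agree on members of the row / column range
theorem pv_rowPred (rows cols : List Int) (Q : Int → Int → Bool) (y : Int) (hy : y ∈ rows) :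
    (!rows.any (fun c => y == c && cols.any (Q c))) = cols.all (fun c => !Q y c) := by
  rw [Bool.eq_iff_iff]
  simp only [Bool.not_eq_true', List.any_eq_false, List.all_eq_true, Bool.and_eq_true,
    beq_iff_eq, List.any_eq_true, not_and, not_exists]
  constructor
  · intro h c hc
    by_contra hne
    exact (h y hy rfl) c hc (by simpa using hne)
  · intro h c _ hyc c' hc'
    subst hyc
    simp [h c' hc']

theorem pv_colPred (rows cols : List Int) (Q : Int → Int → Bool) (y : Int) (hy : y ∈ cols) :
    (rows.all (fun r => !(cols.any (fun c => y == c && Q r c)))) = rows.all (fun r => !Q r y) := by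
  rw [Bool.eq_iff_iff]
  simp only [List.all_eq_true, Bool.not_eq_true', List.any_eq_false, Bool.and_eq_true,
    beq_iff_eq, not_and]
  constructor
  · intro h r hr
    by_contra hne
    exact (h r hr y hy rfl) (by simpa using hne)
  · intro h r hr c hc hyc
    subst hyc
    simp [h r hr]

theorem pv_main (image : List String) : parseImage image = parseImage_alt image := by
  simp only [parseImage, parseImage_alt]
  rw [PySem.Set.ofList_eq_self_of_nodup _ (PySem.List.nodup_pyRange_one 0 _),
      PySem.Set.ofList_eq_self_of_nodup _ (PySem.List.nodup_pyRange_one 0 _),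
      pv_outerFold]
  refine Prod.ext ?_ (Prod.ext ?_ (by simp))
  · rw [pv_discardFold, List.filter_congr (fun y hy => pv_rowPred _ _ (pvCell image) y hy)]
    exact pv_filter_sorted _ _
  · rw [List.foldl_ext _ _ _ (fun e' r _ => pv_discardFold (pvCell image r) _ e'),
        pv_foldlFilter, List.filter_congr (fun y hy => pv_colPred _ _ (pvCell image) y hy)]
    exact pv_filter_sorted _ _

-- ===== VERDICT (by name: the statement is the Claim_ definition above) =====
theorem parseImage_spec : Claim_equal_parseImage := by
  intro image _ _
  unfold Spec_parseImage
  exact pv_main image
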